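-- pv_equiv track=rewrite | github.com/quantumlib/Cirq | dev_tools/shell_tools.py | abbreviate_command_arguments_after_switches
-- ===== SOURCE A (Python) =====
-- from typing import (
--     Optional, Tuple, Union, IO, Any, cast, TYPE_CHECKING, NamedTuple,
-- )
--
-- def abbreviate_command_arguments_after_switches(
--         cmd: Tuple[str, ...]) -> Tuple[str, ...]:
--     result = [cmd[0]]
--     for i in range(1, len(cmd)):
--         if not cmd[i].startswith('-'):
--             result.append('[...]')
--             break
--         result.append(cmd[i])
--     return tuple(result)
-- ===== SOURCE B (Python) =====
-- def abbreviate_command_arguments_after_switches(cmd):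
--     cut = next((i for i, a in enumerate(cmd) if i > 0 and not a.startswith('-')), None)
--     if cut is None:
--         return tuple(cmd)
--     return tuple(cmd[:cut]) + ('[...]',)
-- ===== Notes on version B (the rewrite author's own statement) =====
-- stated objective: alternative
-- what changed: Instead of accumulating a result list while scanning, B locates the index of the first non-switch argument with a single generator search over enumerate and then builds the answer by slicing the original tuple up to that index (or returning it whole); it never builds a running prefix.
-- outside the precondition, e.g. on abbreviate_command_arguments_after_switches(()): A raises IndexError, B returns ()
import Mathlib
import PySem

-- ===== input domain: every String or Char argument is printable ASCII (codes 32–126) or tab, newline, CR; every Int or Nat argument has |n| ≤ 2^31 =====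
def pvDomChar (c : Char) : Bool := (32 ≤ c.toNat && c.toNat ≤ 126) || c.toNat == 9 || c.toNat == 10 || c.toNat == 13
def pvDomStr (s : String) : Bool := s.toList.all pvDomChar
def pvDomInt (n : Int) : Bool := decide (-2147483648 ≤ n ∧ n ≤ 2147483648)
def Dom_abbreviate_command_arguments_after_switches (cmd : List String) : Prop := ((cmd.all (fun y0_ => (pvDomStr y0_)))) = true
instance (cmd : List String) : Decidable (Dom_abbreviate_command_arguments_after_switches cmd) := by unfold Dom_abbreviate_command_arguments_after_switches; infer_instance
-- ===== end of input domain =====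

-- B locates the index of the first non-switch argument via a search over enumerate and
-- slices the original list there, instead of A's accumulate-and-break loop (objective: alternative).

-- ===== PORT A =====
-- the loop body of A: walk cmd[1:], appending switches until a non-switch hits (then '[...]' and break)
def pvLoopA : List String → List String
  | [] => []
  | x :: xs =>
    if ¬ PySem.Str.startswith x "-" then ["[...]"]
    else x :: pvLoopA xs

def abbreviate_command_arguments_after_switches (cmd : List String) : List String :=
  match cmd with
  | [] => []            -- Python raises IndexError on cmd[0]; excluded by Pre_
  | c :: rest => c :: pvLoopA rest

-- ===== PORT B =====
-- cut = next((i for i, a in enumerate(cmd) if i > 0 and not a.startswith('-')), None)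
def abbreviate_command_arguments_after_switches_alt (cmd : List String) : List String :=
  match (PySem.List.enumerate cmd).find?
          (fun p => decide (0 < p.1) && ! PySem.Str.startswith p.2 "-") with
  | none => cmd
  | some (i, _) => PySem.List.slice cmd none (some i) ++ ["[...]"]

-- ===== PRECONDITION & SPEC =====
-- A indexes cmd[0] unconditionally, so the empty tuple raises IndexError; B returns [] there.
def Pre_abbreviate_command_arguments_after_switches (cmd : List String) : Prop := cmd ≠ []
instance (cmd : List String) : Decidable (Pre_abbreviate_command_arguments_after_switches cmd) := by unfold Pre_abbreviate_command_arguments_after_switches; infer_instance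
def pvWitness_abbreviate_command_arguments_after_switches : List String := ["ls", "-l", "file"]

def Spec_abbreviate_command_arguments_after_switches (cmd : List String) (out : List String) : Prop := out = abbreviate_command_arguments_after_switches_alt cmd
instance (cmd : List String) (out : List String) : Decidable (Spec_abbreviate_command_arguments_after_switches cmd out) := by unfold Spec_abbreviate_command_arguments_after_switches; infer_instance

-- ===== CLAIM (what is proved, stated in full; the proofs are below) =====
def Claim_equal_abbreviate_command_arguments_after_switches : Prop := ∀ (cmd : List String), Dom_abbreviate_command_arguments_after_switches cmd → Pre_abbreviate_command_arguments_after_switches cmd → Spec_abbreviate_command_arguments_after_switches cmd (abbreviate_command_arguments_after_switches cmd)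

-- ===== LEMMAS AND PROOFS =====

-- A's loop equals: if every element is a switch, the list itself; else the switch prefix plus '[...]'.
theorem pvLoopA_eq (xs : List String) :
    pvLoopA xs =
      (if (xs.takeWhile (fun a => PySem.Str.startswith a "-")).length = xs.length
       then xs
       else xs.takeWhile (fun a => PySem.Str.startswith a "-") ++ ["[...]"]) := by
  induction xs with
  | nil => simp [pvLoopA]
  | cons x xs ih =>
    simp only [List.takeWhile_cons]
    by_cases h : PySem.Str.startswith x "-" = true
    · rw [pvLoopA, if_neg (not_not_intro h), ih, if_pos h]
      by_cases hl : (xs.takeWhile (fun a => PySem.Str.startswith a "-")).length = xs.length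
      · rw [if_pos hl, if_pos (by simp only [List.length_cons, hl])]
      · rw [if_neg hl, if_neg (by simp only [List.length_cons]; omega), List.cons_append]
    · rw [pvLoopA, if_pos h, if_neg h, if_neg (by simp), List.nil_append]

-- take at the takeWhile boundary reproduces the takeWhile prefix
theorem pv_take_takeWhile (p : String → Bool) (xs : List String) :
    xs.take (xs.takeWhile p).length = xs.takeWhile p := by
  induction xs with
  | nil => rfl
  | cons x xs ih =>
    by_cases h : p x
    · simp [h, ih]
    · simp [h]

-- B's search over enumerate, started at any index s ≥ 1, finds the first non-switch element
-- at offset t = length of the switch prefix, or nothing if all are switches.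
theorem pv_find_enum (rest : List String) (s : Int) (hs : 1 ≤ s) :
    (PySem.List.enumerate rest s).find?
        (fun p => decide (0 < p.1) && ! PySem.Str.startswith p.2 "-") =
      (if (rest.takeWhile (fun a => PySem.Str.startswith a "-")).length = rest.length
       then none
       else rest[(rest.takeWhile (fun a => PySem.Str.startswith a "-")).length]?.map
              (fun a => (s + ((rest.takeWhile (fun a => PySem.Str.startswith a "-")).length : Int), a))) := by
  induction rest generalizing s with
  | nil => simp [PySem.List.enumerate_nil]
  | cons x xs ih =>
    have h0 : (0 : Int) < s := by omega
    rw [PySem.List.enumerate_cons, List.find?_cons]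
    by_cases h : PySem.Str.startswith x "-" = true
    · rw [ih (s + 1) (by omega)]
      simp only [h, Bool.not_true, Bool.and_false, List.takeWhile_cons, if_pos, List.length_cons]
      by_cases hl : (xs.takeWhile (fun a => PySem.Str.startswith a "-")).length = xs.length
      · rw [if_pos hl, if_pos (by omega)]
      · rw [if_neg hl, if_neg (by omega)]
        simp only [List.getElem?_cons_succ]
        congr 1
        funext a
        congr 1
        push_cast
        ring
    · have hF : PySem.Str.startswith x "-" = false := by
        exact Bool.not_eq_true _ ▸ (by simpa using h)
      simp only [hF, Bool.not_false, decide_eq_true h0, Bool.true_and, List.takeWhile_cons,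
        Bool.false_eq_true, if_false, List.length_nil, List.length_cons, List.getElem?_cons_zero,
        Option.map_some]
      rw [if_neg (by omega)]
      simp

-- ===== VERDICT (by name: the statement is the Claim_ definition above) =====
theorem abbreviate_command_arguments_after_switches_spec : Claim_equal_abbreviate_command_arguments_after_switches := by
  intro cmd _ hpre
  unfold Spec_abbreviate_command_arguments_after_switches
  match cmd with
  | [] => exact absurd rfl hpre
  | c :: rest =>
    rw [abbreviate_command_arguments_after_switches]
    unfold abbreviate_command_arguments_after_switches_alt
    rw [PySem.List.enumerate_cons, List.find?_cons]
    rw [show (0 : Int) + 1 = 1 from rfl, pv_find_enum rest 1 le_rfl, pvLoopA_eq]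
    simp only [decide_eq_false (lt_irrefl (0 : Int)), Bool.false_and]
    by_cases hl : (rest.takeWhile (fun a => PySem.Str.startswith a "-")).length = rest.length
    · rw [if_pos hl, if_pos hl]
    · rw [if_neg hl, if_neg hl]
      have hlt : (rest.takeWhile (fun a => PySem.Str.startswith a "-")).length < rest.length :=
        lt_of_le_of_ne (by simpa using (List.takeWhile_prefix _).length_le) hl
      rw [List.getElem?_eq_getElem hlt]
      have hcast : (1 : Int) + ((rest.takeWhile (fun a => PySem.Str.startswith a "-")).length : Int)
          = (((1 + (rest.takeWhile (fun a => PySem.Str.startswith a "-")).length : Nat) : Int)) := by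
        push_cast; ring
      simp only [Option.map_some, hcast, PySem.List.slice_to_natCast]
      rw [Nat.add_comm 1 _, List.take_succ_cons, pv_take_takeWhile, List.cons_append]
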